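-- pv_equiv track=rewrite | github.com/djaessel/Py2MBScript | old2new/TroopTranslator.py | containsSkillAlreadyCheck
-- ===== SOURCE A (Python) =====
-- def containsSkillAlreadyCheck(skill_name : str, skill_val : int, skillsx : list):
--     delx = []
--     for i, s in enumerate(skillsx):
--         if s[0] == skill_name:
--             if int(s[1]) < skill_val:
--                 delx.append(i)
--             else:
--                 return False
--
--     delx.reverse()
--     for i in delx:
--         del skillsx[i]
--     return True
-- ===== SOURCE B (Python) =====
-- KEEP, DROP, STOP = 0, 1, 2
--
-- def _classify(skill_name, skill_val, s):
--     """Decide this entry's fate: KEEP (other skill), DROP (weaker duplicate), STOP (stronger exists)."""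
--     if s[0] != skill_name:
--         return KEEP
--     return STOP if int(s[1]) >= skill_val else DROP
--
-- def containsSkillAlreadyCheck(skill_name : str, skill_val : int, skillsx : list):
--     keep = []
--     for s in skillsx:
--         c = _classify(skill_name, skill_val, s)
--         if c == STOP:
--             return False
--         if c == KEEP:
--             keep.append(s)
--     skillsx[:] = keep
--     return True
-- ===== Notes on version B (the rewrite author's own statement) =====
-- stated objective: simpler
-- what changed: Replaces A's index collection plus reverse-and-delete with a per-entry classifier (KEEP/DROP/STOP) driving one pass that returns False on STOP and otherwise rebuilds the kept entries, assigned in place at the end; the index bookkeeping disappears.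
import Mathlib
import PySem

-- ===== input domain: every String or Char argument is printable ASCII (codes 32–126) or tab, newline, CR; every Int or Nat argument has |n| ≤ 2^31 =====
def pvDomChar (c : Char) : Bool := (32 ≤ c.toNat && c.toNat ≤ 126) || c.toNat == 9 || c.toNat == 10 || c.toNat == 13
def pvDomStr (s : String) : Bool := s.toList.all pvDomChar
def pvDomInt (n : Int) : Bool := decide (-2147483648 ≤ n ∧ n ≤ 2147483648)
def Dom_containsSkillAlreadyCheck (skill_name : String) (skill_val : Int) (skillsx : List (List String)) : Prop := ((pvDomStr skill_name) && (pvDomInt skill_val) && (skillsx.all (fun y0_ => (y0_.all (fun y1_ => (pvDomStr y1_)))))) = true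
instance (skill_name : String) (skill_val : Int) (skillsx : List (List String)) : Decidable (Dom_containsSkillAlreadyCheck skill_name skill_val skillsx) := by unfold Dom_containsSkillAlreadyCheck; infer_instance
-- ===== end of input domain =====

-- B replaces A's index collection + reversed deletion by a per-entry classifier (keep/drop/stop)
-- driving one pass that rebuilds the kept entries (simpler). Equivalence is about the RETURN value
-- only; both Pythons also mutate skillsx in place (removing the weaker matching entries) on True.

-- ===== PORT A =====
-- A's scan: threads delx and the enumerate index; none = exception (s[0] IndexError / int(s[1]) error).
def pvALoop (skill_name : String) (skill_val : Int) (delx : List Nat) (i : Nat) :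
    List (List String) → Option (List Nat × Bool)
  | [] => some (delx, true)
  | s :: rest =>
    match PySem.List.pyGet? s 0 with
    | none => none
    | some s0 =>
      if s0 == skill_name then
        match PySem.List.pyGet? s 1 with
        | none => none
        | some s1 =>
          match PySem.Int.ofStr? s1 with
          | none => none
          | some v =>
            if v < skill_val then pvALoop skill_name skill_val (delx ++ [i]) (i+1) rest
            else some (delx, false)
      else pvALoop skill_name skill_val delx (i+1) rest

def containsSkillAlreadyCheck (skill_name : String) (skill_val : Int) (skillsx : List (List String)) : Bool :=
  match pvALoop skill_name skill_val [] 0 skillsx with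
  | none => false            -- exception in Python; excluded by Pre_
  | some (_delx, b) => b     -- the reversed delx only drives the in-place deletion, not the return value

-- ===== PORT B =====
-- B's classifier: KEEP (other skill), DROP (weaker duplicate), STOP (stronger exists); Err = exception.
inductive PvFate | keep | drop | stop | err
deriving DecidableEq, Repr

def pvClassify (skill_name : String) (skill_val : Int) (s : List String) : PvFate :=
  match PySem.List.pyGet? s 0 with
  | none => .err
  | some s0 =>
    if s0 != skill_name then .keep
    else
      match PySem.List.pyGet? s 1 with
      | none => .err
      | some s1 =>
        match PySem.Int.ofStr? s1 with
        | none => .err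
        | some v => if skill_val ≤ v then .stop else .drop

-- B's loop over classified entries, accumulating the kept entries (they drive only the mutation).
def pvBLoop (skill_name : String) (skill_val : Int) (keep : List (List String)) :
    List (List String) → Option (List (List String) × Bool)
  | [] => some (keep, true)
  | s :: rest =>
    match pvClassify skill_name skill_val s with
    | .err => none
    | .stop => some (keep, false)
    | .keep => pvBLoop skill_name skill_val (keep ++ [s]) rest
    | .drop => pvBLoop skill_name skill_val keep rest

def containsSkillAlreadyCheck_alt (skill_name : String) (skill_val : Int) (skillsx : List (List String)) : Bool :=
  match pvBLoop skill_name skill_val [] skillsx with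
  | none => false            -- exception in Python; excluded by Pre_
  | some (_keep, b) => b     -- on true, Python assigns keep to skillsx[:] (mutation only)

-- ===== PRECONDITION & SPEC =====
-- An entry on which the scan raises: empty s (IndexError on s[0]), or a matching s whose s[1] is
-- missing (IndexError) or not int()-parseable (ValueError).
def pvBadEntry (skill_name : String) (s : List String) : Bool :=
  match PySem.List.pyGet? s 0 with
  | none => true
  | some s0 => s0 == skill_name &&
      (match PySem.List.pyGet? s 1 with
       | none => true
       | some s1 => (PySem.Int.ofStr? s1).isNone)

-- An entry that makes both programs return False before reaching later entries.
def pvStrongEntry (skill_name : String) (skill_val : Int) (s : List String) : Bool :=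
  match PySem.List.pyGet? s 0 with
  | none => false
  | some s0 => s0 == skill_name &&
      (match PySem.List.pyGet? s 1 with
       | none => false
       | some s1 =>
         match PySem.Int.ofStr? s1 with
         | none => false
         | some v => decide (skill_val ≤ v))

-- Pre_ excludes exactly the inputs on which A raises (IndexError/ValueError): a raising entry is
-- reached unless some strictly earlier entry already returns False.  B raises on exactly the same inputs.
def Pre_containsSkillAlreadyCheck (skill_name : String) (skill_val : Int) (skillsx : List (List String)) : Prop :=
  ∀ i < skillsx.length, pvBadEntry skill_name (skillsx.getD i []) = true →
    ∃ j < i, pvStrongEntry skill_name skill_val (skillsx.getD j []) = true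
instance (skill_name : String) (skill_val : Int) (skillsx : List (List String)) : Decidable (Pre_containsSkillAlreadyCheck skill_name skill_val skillsx) := by unfold Pre_containsSkillAlreadyCheck; infer_instance

def pvWitness_containsSkillAlreadyCheck : String × Int × List (List String) :=
  ("athletics", 3, [["athletics", "1"], ["riding", "x"]])

def Spec_containsSkillAlreadyCheck (skill_name : String) (skill_val : Int) (skillsx : List (List String)) (out : Bool) : Prop := out = containsSkillAlreadyCheck_alt skill_name skill_val skillsx
instance (skill_name : String) (skill_val : Int) (skillsx : List (List String)) (out : Bool) : Decidable (Spec_containsSkillAlreadyCheck skill_name skill_val skillsx out) := by unfold Spec_containsSkillAlreadyCheck; infer_instance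

-- ===== CLAIM (what is proved, stated in full; the proofs are below) =====
def Claim_equal_containsSkillAlreadyCheck : Prop := ∀ (skill_name : String) (skill_val : Int) (skillsx : List (List String)), Dom_containsSkillAlreadyCheck skill_name skill_val skillsx → Pre_containsSkillAlreadyCheck skill_name skill_val skillsx → Spec_containsSkillAlreadyCheck skill_name skill_val skillsx (containsSkillAlreadyCheck skill_name skill_val skillsx)

-- ===== LEMMAS AND PROOFS =====

-- the head of a Pre_-satisfying list is not a raising entry
theorem pvPre_head (skill_name : String) (skill_val : Int) (s : List String) (rest : List (List String))
    (h : Pre_containsSkillAlreadyCheck skill_name skill_val (s :: rest)) :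
    pvBadEntry skill_name s = false := by
  by_contra hb
  obtain ⟨j, hj, _⟩ := h 0 (by simp) (by simpa using Bool.not_eq_false _ ▸ (by simpa using hb))
  omega

-- Pre_ restricts to the tail when the head is not a strong entry
theorem pvPre_tail (skill_name : String) (skill_val : Int) (s : List String) (rest : List (List String))
    (h : Pre_containsSkillAlreadyCheck skill_name skill_val (s :: rest))
    (hs : pvStrongEntry skill_name skill_val s = false) :
    Pre_containsSkillAlreadyCheck skill_name skill_val rest := by
  intro i hi hbad
  obtain ⟨j, hj, hstr⟩ := h (i + 1) (by simp; omega) (by simpa using hbad)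
  match j, hj with
  | 0, _ => simp [hs] at hstr
  | j + 1, hj => exact ⟨j, by omega, by simpa using hstr⟩

-- the core equivalence: on Pre_, A's scan (for any delx, i) and B's scan (for any keep)
-- agree on the Boolean
theorem pvLoop_eq (skill_name : String) (skill_val : Int) :
    ∀ (l : List (List String)), Pre_containsSkillAlreadyCheck skill_name skill_val l →
      ∀ (delx : List Nat) (i : Nat) (keep : List (List String)),
        (pvALoop skill_name skill_val delx i l).map Prod.snd =
          (pvBLoop skill_name skill_val keep l).map Prod.snd := by
  intro l
  induction l with
  | nil => intro _ delx i keep; simp [pvALoop, pvBLoop]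
  | cons s rest ih =>
    intro h delx i keep
    have hbad := pvPre_head skill_name skill_val s rest h
    cases h0 : PySem.List.pyGet? s 0 with
    | none => simp [pvBadEntry, h0] at hbad
    | some s0 =>
      by_cases hn : s0 = skill_name
      · cases h1 : PySem.List.pyGet? s 1 with
        | none => simp [pvBadEntry, h0, h1, hn] at hbad
        | some s1 =>
          cases hv : PySem.Int.ofStr? s1 with
          | none => simp [pvBadEntry, h0, h1, hn, hv] at hbad
          | some v =>
            by_cases hlt : v < skill_val
            · have hstrong : pvStrongEntry skill_name skill_val s = false := by
                simp [pvStrongEntry, h0, h1, hv]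
                intro _; omega
              have hcls : pvClassify skill_name skill_val s = .drop := by
                simp [pvClassify, h0, h1, hv, hn, show ¬ skill_val ≤ v by omega]
              have htail := pvPre_tail skill_name skill_val s rest h hstrong
              simp [pvALoop, pvBLoop, h0, h1, hv, hn, hlt, hcls,
                ih htail (delx ++ [i]) (i + 1) keep]
            · have hcls : pvClassify skill_name skill_val s = .stop := by
                simp [pvClassify, h0, h1, hv, hn, show skill_val ≤ v by omega]
              simp [pvALoop, pvBLoop, h0, h1, hv, hn, hlt, hcls]
      · have hstrong : pvStrongEntry skill_name skill_val s = false := by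
          simp [pvStrongEntry, h0, hn]
        have hcls : pvClassify skill_name skill_val s = .keep := by
          simp [pvClassify, h0, hn]
        have htail := pvPre_tail skill_name skill_val s rest h hstrong
        simp [pvALoop, pvBLoop, h0, hn, hcls, ih htail delx (i + 1) (keep ++ [s])]

-- ===== VERDICT (by name: the statement is the Claim_ definition above) =====
theorem containsSkillAlreadyCheck_spec : Claim_equal_containsSkillAlreadyCheck := by
  intro skill_name skill_val skillsx _dom hpre
  unfold Spec_containsSkillAlreadyCheck containsSkillAlreadyCheck containsSkillAlreadyCheck_alt
  have h := pvLoop_eq skill_name skill_val skillsx hpre [] 0 []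
  cases ha : pvALoop skill_name skill_val [] 0 skillsx <;>
    cases hb : pvBLoop skill_name skill_val [] skillsx <;>
      rw [ha, hb] at h <;> simp_all
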